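-- pv_equiv track=rewrite | github.com/PabloHenrickk/sentinel-osint | agents/infra_agent.py | _get_attack_type
-- ===== SOURCE A (Python) =====
-- def _get_attack_type(port: int) -> str:
--     """Mapeia porta para categoria de ataque para lookup no MITRE."""
--     mapping = {
--         frozenset({1433, 3306, 5432, 9200, 27017, 6379, 5984}): "database_exposed",
--         frozenset({3389})                                       : "rdp_exposed",
--         frozenset({22})                                         : "ssh_exposed",
--         frozenset({21})                                         : "ftp_exposed",
--         frozenset({445, 139})                                   : "smb_exposed",
--         frozenset({23})                                         : "telnet_exposed",
--     }
--     for ports, attack_type in mapping.items():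
--         if port in ports:
--             return attack_type
--     return ""
-- ===== SOURCE B (Python) =====
-- _PORT_ATTACK = {
--     1433: "database_exposed", 3306: "database_exposed", 5432: "database_exposed",
--     9200: "database_exposed", 27017: "database_exposed", 6379: "database_exposed",
--     5984: "database_exposed",
--     3389: "rdp_exposed",
--     22: "ssh_exposed",
--     21: "ftp_exposed",
--     445: "smb_exposed", 139: "smb_exposed",
--     23: "telnet_exposed",
-- }
--
-- def _get_attack_type(port: int) -> str:
--     """Mapeia porta para categoria de ataque para lookup no MITRE."""
--     return _PORT_ATTACK.get(port, "")
-- ===== Notes on version B (the rewrite author's own statement) =====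
-- stated objective: simpler
-- what changed: Replaced the loop over six frozenset-keyed groups with one flat port->category dict built once at module level and a single .get(port, '') lookup; the loop and membership tests disappear.
import Mathlib
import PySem

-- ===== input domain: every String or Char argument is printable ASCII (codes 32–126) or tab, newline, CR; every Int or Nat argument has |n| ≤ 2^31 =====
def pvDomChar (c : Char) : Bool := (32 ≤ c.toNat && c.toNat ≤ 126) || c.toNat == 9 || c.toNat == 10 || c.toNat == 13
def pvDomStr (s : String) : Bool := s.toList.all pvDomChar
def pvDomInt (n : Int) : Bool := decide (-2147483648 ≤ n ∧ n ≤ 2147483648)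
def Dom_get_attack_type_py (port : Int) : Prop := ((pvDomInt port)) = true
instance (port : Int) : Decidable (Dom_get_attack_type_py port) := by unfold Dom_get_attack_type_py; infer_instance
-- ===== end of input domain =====

-- B replaces A's loop over six frozenset groups with one flat port→category dict and a single lookup (objective: simpler).

-- ===== PORT A =====
-- A's dict keyed by frozensets: an association list of (set of ports, category), iterated in insertion order.
def pvMappingA : List (PySem.Set Int × String) :=
  [ (PySem.Set.ofList [1433, 3306, 5432, 9200, 27017, 6379, 5984], "database_exposed"),
    (PySem.Set.ofList [3389], "rdp_exposed"),
    (PySem.Set.ofList [22], "ssh_exposed"),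
    (PySem.Set.ofList [21], "ftp_exposed"),
    (PySem.Set.ofList [445, 139], "smb_exposed"),
    (PySem.Set.ofList [23], "telnet_exposed") ]

-- the for-loop with early return
def pvLoopA (port : Int) : List (PySem.Set Int × String) → String
  | [] => ""
  | (ports, attack_type) :: rest =>
      if port ∈ ports then attack_type else pvLoopA port rest

def get_attack_type_py (port : Int) : String := pvLoopA port pvMappingA

-- ===== PORT B =====
-- flat dict, built once; lookup with default ""
def pvPortAttack : PySem.Dict Int String :=
  PySem.Dict.ofList [ (1433, "database_exposed"), (3306, "database_exposed"), (5432, "database_exposed"),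
    (9200, "database_exposed"), (27017, "database_exposed"), (6379, "database_exposed"),
    (5984, "database_exposed"),
    (3389, "rdp_exposed"),
    (22, "ssh_exposed"),
    (21, "ftp_exposed"),
    (445, "smb_exposed"), (139, "smb_exposed"),
    (23, "telnet_exposed") ]

def get_attack_type_py_alt (port : Int) : String := PySem.Dict.getD pvPortAttack port ""

-- ===== PRECONDITION & SPEC =====
def Spec_get_attack_type_py (port : Int) (out : String) : Prop := out = get_attack_type_py_alt port
instance (port : Int) (out : String) : Decidable (Spec_get_attack_type_py port out) := by unfold Spec_get_attack_type_py; infer_instance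

-- ===== CLAIM (what is proved, stated in full; the proofs are below) =====
def Claim_equal_get_attack_type_py : Prop := ∀ (port : Int), Dom_get_attack_type_py port → Spec_get_attack_type_py port (get_attack_type_py port)

-- ===== LEMMAS AND PROOFS =====
theorem pv_eq (port : Int) : get_attack_type_py port = get_attack_type_py_alt port := by
  rcases eq_or_ne port 1433 with h | h1433
  · subst h; decide
  rcases eq_or_ne port 3306 with h | h3306
  · subst h; decide
  rcases eq_or_ne port 5432 with h | h5432
  · subst h; decide
  rcases eq_or_ne port 9200 with h | h9200
  · subst h; decide
  rcases eq_or_ne port 27017 with h | h27017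
  · subst h; decide
  rcases eq_or_ne port 6379 with h | h6379
  · subst h; decide
  rcases eq_or_ne port 5984 with h | h5984
  · subst h; decide
  rcases eq_or_ne port 3389 with h | h3389
  · subst h; decide
  rcases eq_or_ne port 22 with h | h22
  · subst h; decide
  rcases eq_or_ne port 21 with h | h21
  · subst h; decide
  rcases eq_or_ne port 445 with h | h445
  · subst h; decide
  rcases eq_or_ne port 139 with h | h139
  · subst h; decide
  rcases eq_or_ne port 23 with h | h23
  · subst h; decide
  have hd : pvPortAttack = PySem.Dict.mk
      [(1433, "database_exposed"), (3306, "database_exposed"), (5432, "database_exposed"),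
       (9200, "database_exposed"), (27017, "database_exposed"), (6379, "database_exposed"),
       (5984, "database_exposed"), (3389, "rdp_exposed"), (22, "ssh_exposed"), (21, "ftp_exposed"),
       (445, "smb_exposed"), (139, "smb_exposed"), (23, "telnet_exposed")] := by decide
  simp [get_attack_type_py, get_attack_type_py_alt, pvMappingA, pvLoopA, hd,
    PySem.Set.ofList, PySem.Dict.getD, PySem.Dict.get?,
    h1433, Ne.symm h1433, h3306, Ne.symm h3306, h5432, Ne.symm h5432, h9200, Ne.symm h9200, h27017, Ne.symm h27017, h6379, Ne.symm h6379, h5984, Ne.symm h5984, h3389, Ne.symm h3389, h22, Ne.symm h22, h21, Ne.symm h21, h445, Ne.symm h445, h139, Ne.symm h139, h23, Ne.symm h23]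

-- ===== VERDICT (by name: the statement is the Claim_ definition above) =====
theorem get_attack_type_py_spec : Claim_equal_get_attack_type_py := by
  intro port _
  exact pv_eq port
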